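-- pv_equiv track=rewrite | github.com/giffels/PRODCOMMON | src/python/ProdCommon/MCPayloads/DatasetConventions.py | parseDatasetPath
-- ===== SOURCE A (Python) =====
-- def parseDatasetPath(datasetPath):
--     """
--     _parseDatasetPath_
--
--     chops up the dataset path provided and returns a dictionary
--     of Primary, Processed, DataTier
--
--     """
--     result = {}
--     result.setdefault("Primary", None)
--     result.setdefault("Processed", None)
--     result.setdefault("DataTier", None)
--     result.setdefault("Analysis", None)
--
--
--     while datasetPath.startswith("/"):
--         datasetPath = datasetPath[1:]
--     datasetSplit = datasetPath.split("/")
--     elems = len(datasetSplit)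
--     if elems == 1:
--         result['Primary'] = datasetSplit[0]
--         return result
--     elif elems == 2:
--         result['Primary'] = datasetSplit[0]
--         result['Processed'] = datasetSplit[1]
--         return result
--     elif elems == 3:
--         result['Primary'] = datasetSplit[0]
--         result['Processed'] = datasetSplit[1]
--         result['DataTier'] = datasetSplit[2]
--         return result
--
--     result['Primary'] = datasetSplit[0]
--     result['Processed'] = datasetSplit[1]
--     result['DataTier'] = datasetSplit[2]
--     result['Analysis'] = datasetSplit[3]
--     return result
-- ===== SOURCE B (Python) =====
-- def parseDatasetPath(datasetPath):
--     result = {"Primary": None, "Processed": None, "DataTier": None, "Analysis": None}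
--     rest = datasetPath.lstrip("/")
--     for key in result:
--         piece, sep, rest = rest.partition("/")
--         result[key] = piece
--         if not sep:
--             break
--     return result
-- ===== Notes on version B (the rewrite author's own statement) =====
-- stated objective: alternative
-- what changed: Replaces A's full slash-split plus if/elif cascade on the element count by an incremental str.partition scan that peels one component per key and breaks at the first missing separator, never materializing the full split list.
import Mathlib
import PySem

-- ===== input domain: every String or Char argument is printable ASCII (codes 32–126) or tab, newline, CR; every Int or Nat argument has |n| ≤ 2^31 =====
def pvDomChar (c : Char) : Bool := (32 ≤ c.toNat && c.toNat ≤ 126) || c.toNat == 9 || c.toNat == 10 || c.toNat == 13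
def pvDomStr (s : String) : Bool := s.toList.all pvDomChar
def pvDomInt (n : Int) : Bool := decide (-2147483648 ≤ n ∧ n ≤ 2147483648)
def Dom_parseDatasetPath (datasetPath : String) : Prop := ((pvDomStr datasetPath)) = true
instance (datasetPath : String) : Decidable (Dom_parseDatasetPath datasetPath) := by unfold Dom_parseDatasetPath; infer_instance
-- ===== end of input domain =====

-- B replaces A's full split + element-count if/elif cascade by an incremental
-- str.partition scan that peels one component per key and stops at the first
-- missing separator (objective: alternative decomposition, same cost class).

-- ===== PORT A =====
-- A's `while datasetPath.startswith("/"): datasetPath = datasetPath[1:]` over the char list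
def pvStripSlashesA : List Char → List Char
  | [] => []
  | c :: rest => if c = '/' then pvStripSlashesA rest else c :: rest

def parseDatasetPath (datasetPath : String) : List (String × Option String) :=
  let result : PySem.Dict String (Option String) :=
    ((((PySem.Dict.empty).setdefault "Primary" none).setdefault "Processed" none).setdefault
        "DataTier" none).setdefault "Analysis" none
  let dp := pvStripSlashesA datasetPath.toList
  let datasetSplit := (PySem.Chars.splitOn dp ['/']).map String.mk
  let elems := datasetSplit.length
  -- in each branch the indices are in range (split is never empty), so pyGet? is some there
  if elems = 1 then
    (result.insert "Primary" (PySem.List.pyGet? datasetSplit 0)).items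
  else if elems = 2 then
    ((result.insert "Primary" (PySem.List.pyGet? datasetSplit 0)).insert
        "Processed" (PySem.List.pyGet? datasetSplit 1)).items
  else if elems = 3 then
    (((result.insert "Primary" (PySem.List.pyGet? datasetSplit 0)).insert
        "Processed" (PySem.List.pyGet? datasetSplit 1)).insert
        "DataTier" (PySem.List.pyGet? datasetSplit 2)).items
  else
    ((((result.insert "Primary" (PySem.List.pyGet? datasetSplit 0)).insert
        "Processed" (PySem.List.pyGet? datasetSplit 1)).insert
        "DataTier" (PySem.List.pyGet? datasetSplit 2)).insert
        "Analysis" (PySem.List.pyGet? datasetSplit 3)).items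

-- ===== PORT B =====
-- exact port of Python's rest.partition("/") for the one-char separator:
-- (before, sep-found?, after)
def pvPartition : List Char → List Char × Bool × List Char
  | [] => ([], false, [])
  | c :: rest =>
      if c = '/' then ([], true, rest)
      else
        let (p, b, r) := pvPartition rest
        (c :: p, b, r)

-- B's `for key in result: piece, sep, rest = rest.partition("/"); result[key] = piece; if not sep: break`
def pvAssignB (keys : List String) (rest : List Char)
    (d : PySem.Dict String (Option String)) : PySem.Dict String (Option String) :=
  match keys with
  | [] => d
  | k :: ks =>
      let (piece, sep, rest') := pvPartition rest
      let d' := d.insert k (some (String.mk piece))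
      if sep then pvAssignB ks rest' d' else d'

def parseDatasetPath_alt (datasetPath : String) : List (String × Option String) :=
  -- result = {"Primary": None, "Processed": None, "DataTier": None, "Analysis": None}
  let result : PySem.Dict String (Option String) :=
    ((((PySem.Dict.empty).insert "Primary" none).insert "Processed" none).insert
        "DataTier" none).insert "Analysis" none
  -- rest = datasetPath.lstrip("/")  (exact: drop the leading '/' characters)
  let rest := datasetPath.toList.dropWhile (· = '/')
  (pvAssignB ["Primary", "Processed", "DataTier", "Analysis"] rest result).items

-- ===== PRECONDITION & SPEC =====
def Spec_parseDatasetPath (datasetPath : String) (out : List (String × Option String)) : Prop := out = parseDatasetPath_alt datasetPath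
instance (datasetPath : String) (out : List (String × Option String)) : Decidable (Spec_parseDatasetPath datasetPath out) := by unfold Spec_parseDatasetPath; infer_instance

-- ===== CLAIM (what is proved, stated in full; the proofs are below) =====
def Claim_equal_parseDatasetPath : Prop := ∀ (datasetPath : String), Dom_parseDatasetPath datasetPath → Spec_parseDatasetPath datasetPath (parseDatasetPath datasetPath)

-- ===== LEMMAS AND PROOFS =====

lemma pvStripSlashesA_eq_dropWhile (l : List Char) :
    pvStripSlashesA l = l.dropWhile (· = '/') := by
  induction l with
  | nil => rfl
  | cons c rest ih =>
      by_cases h : c = '/' <;> simp [pvStripSlashesA, List.dropWhile, h, ih]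

-- characterisation of PySem's splitOn on separator ['/'] via pvPartition
lemma splitOn_go_eq (n : Nat) : ∀ (l : List Char), l.length ≤ n →
    ∀ (fuel : Nat), l.length < fuel → ∀ (cur : List Char) (acc : List (List Char)),
    PySem.Chars.splitOn.go ['/'] fuel l cur acc =
      acc.reverse ++ [cur.reverse ++ (pvPartition l).1] ++
        (if (pvPartition l).2.1 = true then PySem.Chars.splitOn (pvPartition l).2.2 ['/'] else []) := by
  induction n with
  | zero =>
      intro l hl fuel hf cur acc
      interval_cases hl' : l.length
      · match l, hl' with
        | [], _ =>
          match fuel, hf with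
          | fuel+1, _ =>
            simp [PySem.Chars.splitOn.go, pvPartition]
  | succ n ih =>
      intro l hl fuel hf cur acc
      match l with
      | [] =>
          match fuel, hf with
          | fuel+1, _ => simp [PySem.Chars.splitOn.go, pvPartition]
      | c :: rest =>
          match fuel, hf with
          | fuel+1, hf =>
            have hr : rest.length ≤ n := by simp at hl; omega
            have hrf : rest.length < fuel := by simp at hf; omega
            by_cases hc : c = '/'
            · subst hc
              have hpre : List.isPrefixOf ['/'] ('/' :: rest) = true := by
                simp [List.isPrefixOf]
              rw [show PySem.Chars.splitOn.go ['/'] (fuel+1) ('/' :: rest) cur acc =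
                    PySem.Chars.splitOn.go ['/'] fuel (List.drop 1 ('/' :: rest)) []
                      (cur.reverse :: acc) by
                    simp [PySem.Chars.splitOn.go, hpre]]
              simp only [List.drop_one, List.tail_cons]
              rw [ih rest hr fuel hrf]
              simp only [pvPartition, reduceIte]
              rw [show PySem.Chars.splitOn rest ['/'] =
                    PySem.Chars.splitOn.go ['/'] (rest.length + 1) rest [] [] from rfl]
              rw [ih rest hr (rest.length + 1) (by omega)]
              simp
            · have hpre : List.isPrefixOf ['/'] (c :: rest) = false := by
                simp [List.isPrefixOf]; intro h; exact absurd h.symm hc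
              rw [show PySem.Chars.splitOn.go ['/'] (fuel+1) (c :: rest) cur acc =
                    PySem.Chars.splitOn.go ['/'] fuel rest (c :: cur) acc by
                    simp [PySem.Chars.splitOn.go, hpre]]
              rw [ih rest hr fuel hrf]
              rcases hp : pvPartition rest with ⟨p, b, r⟩
              simp [pvPartition, hc, hp]

lemma splitOn_eq_partition (l : List Char) :
    PySem.Chars.splitOn l ['/'] =
      (pvPartition l).1 ::
        (if (pvPartition l).2.1 = true then PySem.Chars.splitOn (pvPartition l).2.2 ['/'] else []) := by
  rw [show PySem.Chars.splitOn l ['/'] =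
        PySem.Chars.splitOn.go ['/'] (l.length + 1) l [] [] from rfl]
  rw [splitOn_go_eq l.length l le_rfl (l.length + 1) (by omega)]
  simp

lemma pyGet4 (a b c d : String) (t : List String) :
    PySem.List.pyGet? (a :: b :: c :: d :: t) 0 = some a ∧
    PySem.List.pyGet? (a :: b :: c :: d :: t) 1 = some b ∧
    PySem.List.pyGet? (a :: b :: c :: d :: t) 2 = some c ∧
    PySem.List.pyGet? (a :: b :: c :: d :: t) 3 = some d := by
  refine ⟨?_, ?_, ?_, ?_⟩
  · exact (PySem.List.pyGet?_natCast (a :: b :: c :: d :: t) 0).trans (by simp)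
  · exact (PySem.List.pyGet?_natCast (a :: b :: c :: d :: t) 1).trans (by simp)
  · exact (PySem.List.pyGet?_natCast (a :: b :: c :: d :: t) 2).trans (by simp)
  · exact (PySem.List.pyGet?_natCast (a :: b :: c :: d :: t) 3).trans (by simp)

-- ===== VERDICT (by name: the statement is the Claim_ definition above) =====
theorem parseDatasetPath_spec : Claim_equal_parseDatasetPath := by
  intro s _
  show parseDatasetPath s = parseDatasetPath_alt s
  unfold parseDatasetPath parseDatasetPath_alt
  rw [pvStripSlashesA_eq_dropWhile]
  generalize s.toList.dropWhile (· = '/') = l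
  rcases h1 : pvPartition l with ⟨p1, b1, r1⟩
  simp only [splitOn_eq_partition l, h1]
  cases b1
  · simp [pvAssignB, h1, PySem.List.pyGet?, PySem.List.pyIdx?]
    rfl
  · rcases h2 : pvPartition r1 with ⟨p2, b2, r2⟩
    simp only [splitOn_eq_partition r1, h2]
    cases b2
    · simp [pvAssignB, h1, h2, PySem.List.pyGet?, PySem.List.pyIdx?]
      rfl
    · rcases h3 : pvPartition r2 with ⟨p3, b3, r3⟩
      simp only [splitOn_eq_partition r2, h3]
      cases b3
      · simp [pvAssignB, h1, h2, h3, PySem.List.pyGet?, PySem.List.pyIdx?]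
        rfl
      · rcases h4 : pvPartition r3 with ⟨p4, b4, r4⟩
        simp only [splitOn_eq_partition r3, h4]
        obtain ⟨g0, g1, g2, g3⟩ :=
          pyGet4 (String.mk p1) (String.mk p2) (String.mk p3) (String.mk p4)
            ((if b4 = true then PySem.Chars.splitOn r4 ['/'] else []).map String.mk)
        simp only [reduceIte, List.map_cons, List.length_cons]
        have h1' : ((if b4 = true then PySem.Chars.splitOn r4 ['/'] else []).map String.mk).length + 1 + 1 + 1 + 1 ≠ 1 := by omega
        have h2' : ((if b4 = true then PySem.Chars.splitOn r4 ['/'] else []).map String.mk).length + 1 + 1 + 1 + 1 ≠ 2 := by omega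
        have h3' : ((if b4 = true then PySem.Chars.splitOn r4 ['/'] else []).map String.mk).length + 1 + 1 + 1 + 1 ≠ 3 := by omega
        rw [if_neg h1', if_neg h2', if_neg h3', g0, g1, g2, g3]
        cases b4 <;> simp [pvAssignB, h1, h2, h3, h4] <;> rfl
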